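-- pv_equiv track=rewrite | github.com/anooprh/leetcode-python | algorithm/a051_N_Queens.py | isOkay
-- ===== SOURCE A (Python) =====
-- def isOkay(grid, row, col):
--     n = len(grid)
--     for i in range(n):
--         for j in range(n):
--             if grid[i][j] == 'Q':
--                 if i == row:
--                     return False
--                 if j == col:
--                     return False
--                 if abs(row - i) == abs(col - j):
--                     return False
--     return True
-- ===== SOURCE B (Python) =====
-- def isOkay(grid, row, col):
--     n = len(grid)
--     for i in range(n):
--         r = grid[i]
--         if i == row:
--             if 'Q' in r[:n]:
--                 return False
--         else:
--             d = row - i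
--             for j in (col, col - d, col + d):
--                 if 0 <= j < n and r[j] == 'Q':
--                     return False
--     return True
-- ===== Notes on version B (the rewrite author's own statement) =====
-- stated objective: faster
-- what changed: Instead of scanning all n^2 cells and testing each queen against (row,col), B scans each board row once and inspects only the at most four cells that could clash: the whole row when i == row, otherwise just columns col, col-(row-i) and col+(row-i).
-- outside the precondition, e.g. on isOkay([['Q'], ['.', '.']], 1, 1): A returns False, B raises IndexError; on isOkay([['Q'], ['Q', '.']], 0, 0): A returns False, B returns False
import Mathlib
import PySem

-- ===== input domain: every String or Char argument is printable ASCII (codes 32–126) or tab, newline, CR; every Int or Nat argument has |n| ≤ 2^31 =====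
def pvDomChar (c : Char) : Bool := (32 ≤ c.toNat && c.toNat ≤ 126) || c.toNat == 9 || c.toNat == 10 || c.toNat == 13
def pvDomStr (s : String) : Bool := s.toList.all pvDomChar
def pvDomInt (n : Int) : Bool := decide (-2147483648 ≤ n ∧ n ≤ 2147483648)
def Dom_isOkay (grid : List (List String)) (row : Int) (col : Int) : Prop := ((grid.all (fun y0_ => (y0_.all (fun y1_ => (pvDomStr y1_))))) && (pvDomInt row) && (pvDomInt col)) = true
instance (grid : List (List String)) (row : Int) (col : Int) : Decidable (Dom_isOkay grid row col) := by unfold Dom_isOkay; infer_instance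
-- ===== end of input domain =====

-- B replaces A's full O(n^2) scan of the board by an O(n) scan that, for each
-- board row, looks only at the cells in row `row`, column `col` and the two
-- diagonals through (row, col); objective: faster (asymptotic).

-- ===== PORT A =====
-- inner `for j in range(n)` loop of A: some false = early `return False`, none = loop fell through
def isOkayA_J (grid : List (List String)) (row col i : Int) : List Int → Option Bool
  | [] => none
  | j :: js =>
    if PySem.List.pyGetD (PySem.List.pyGetD grid i []) j "" = "Q" then
      if i = row then some false
      else if j = col then some false
      else if (row - i).natAbs = (col - j).natAbs then some false
      else isOkayA_J grid row col i js
    else isOkayA_J grid row col i js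

-- outer `for i in range(n)` loop of A
def isOkayA_I (grid : List (List String)) (row col n : Int) : List Int → Bool
  | [] => true
  | i :: is =>
    match isOkayA_J grid row col i (PySem.List.pyRange 0 n 1) with
    | some b => b
    | none => isOkayA_I grid row col n is

def isOkay (grid : List (List String)) (row : Int) (col : Int) : Bool :=
  isOkayA_I grid row col (grid.length : Int) (PySem.List.pyRange 0 (grid.length : Int) 1)

-- ===== PORT B =====
-- body of B's outer loop for one row r = grid[i]: true = a `return False` fires
def altRowHit (r : List String) (row col n i : Int) : Bool :=
  if i = row then decide ("Q" ∈ PySem.List.slice r none (some n))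
  else
    let d := row - i
    [col, col - d, col + d].any fun j =>
      decide (0 ≤ j) && decide (j < n) && decide (PySem.List.pyGetD r j "" = "Q")

-- B's outer `for i in range(n)` loop
def isOkayB_I (grid : List (List String)) (row col n : Int) : List Int → Bool
  | [] => true
  | i :: is =>
    if altRowHit (PySem.List.pyGetD grid i []) row col n i then false
    else isOkayB_I grid row col n is

def isOkay_alt (grid : List (List String)) (row : Int) (col : Int) : Bool :=
  isOkayB_I grid row col (grid.length : Int) (PySem.List.pyRange 0 (grid.length : Int) 1)

-- ===== PRECONDITION & SPEC =====
-- Pre_ excludes ragged grids with a row shorter than len(grid): there A's grid[i][j]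
-- (or B's r[j]) can raise IndexError; A happens to return early on a few such grids
-- when it meets a clashing queen first, and those too are excluded (see cites).
def Pre_isOkay (grid : List (List String)) (row : Int) (col : Int) : Prop :=
  ∀ r ∈ grid, grid.length ≤ r.length
instance (grid : List (List String)) (row : Int) (col : Int) : Decidable (Pre_isOkay grid row col) := by unfold Pre_isOkay; infer_instance
def pvWitness_isOkay : List (List String) × Int × Int := ([[".", "Q"], [".", "."]], 1, 0)

def Spec_isOkay (grid : List (List String)) (row : Int) (col : Int) (out : Bool) : Prop := out = isOkay_alt grid row col
instance (grid : List (List String)) (row : Int) (col : Int) (out : Bool) : Decidable (Spec_isOkay grid row col out) := by unfold Spec_isOkay; infer_instance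

-- ===== CLAIM (what is proved, stated in full; the proofs are below) =====
def Claim_equal_isOkay : Prop := ∀ (grid : List (List String)) (row : Int) (col : Int), Dom_isOkay grid row col → Pre_isOkay grid row col → Spec_isOkay grid row col (isOkay grid row col)

-- ===== LEMMAS AND PROOFS =====

-- the Boolean condition on which A's inner loop returns False at index j
def badB (grid : List (List String)) (row col i j : Int) : Bool :=
  decide (PySem.List.pyGetD (PySem.List.pyGetD grid i []) j "" = "Q") &&
    (decide (i = row) || decide (j = col) || decide ((row - i).natAbs = (col - j).natAbs))

theorem isOkayA_J_eq (grid : List (List String)) (row col i : Int) (js : List Int) :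
    isOkayA_J grid row col i js =
      if js.any (badB grid row col i) then some false else none := by
  induction js with
  | nil => rfl
  | cons j js ih =>
    simp only [isOkayA_J]
    by_cases hq : PySem.List.pyGetD (PySem.List.pyGetD grid i []) j "" = "Q"
    · rw [if_pos hq]
      by_cases h1 : i = row
      · rw [if_pos h1]
        have hb : badB grid row col i j = true := by
          unfold badB; rw [decide_eq_true hq]; simp [h1]
        simp [List.any_cons, hb]
      · rw [if_neg h1]
        by_cases h2 : j = col
        · rw [if_pos h2]
          have hb : badB grid row col i j = true := by
            unfold badB; rw [decide_eq_true hq]; simp [h2]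
          simp [List.any_cons, hb]
        · rw [if_neg h2]
          by_cases h3 : (row - i).natAbs = (col - j).natAbs
          · rw [if_pos h3]
            have hb : badB grid row col i j = true := by
              unfold badB; rw [decide_eq_true hq]; simp [h3]
            simp [List.any_cons, hb]
          · rw [if_neg h3, ih]
            have hb : badB grid row col i j = false := by simp [badB, hq, h1, h2, h3]
            simp [List.any_cons, hb]
    · rw [if_neg hq, ih]
      have hb : badB grid row col i j = false := by simp [badB, hq]
      simp [List.any_cons, hb]

theorem mem_take_Q (r : List String) (m : Nat) :
    "Q" ∈ r.take m ↔ ∃ k, k < m ∧ r.getD k "" = "Q" := by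
  have hlen : (r.take m).length = min m r.length := by simp
  constructor
  · intro h
    obtain ⟨k, hk, hget⟩ := List.getElem_of_mem h
    refine ⟨k, by omega, ?_⟩
    have hlt : k < r.length := by omega
    rw [List.getD_eq_getElem r "" hlt, ← hget, List.getElem_take]
  · rintro ⟨k, hk, hget⟩
    by_cases hlt : k < r.length
    · rw [List.getD_eq_getElem r "" hlt] at hget
      have hk' : k < (r.take m).length := by omega
      have : (r.take m)[k] = "Q" := by rw [List.getElem_take]; exact hget
      exact this ▸ List.getElem_mem hk'
    · exfalso
      rw [List.getD_eq_default r "" (by omega)] at hget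
      simp at hget

-- bridge pyGetD with an Int index 0 ≤ j to getD
theorem pyGetD_int (r : List String) (j : Int) (hj : 0 ≤ j) :
    PySem.List.pyGetD r j "" = r.getD j.toNat "" := by
  have h : j = (j.toNat : Int) := by omega
  conv_lhs => rw [h]
  rw [PySem.List.pyGetD_natCast]

theorem altRowHit_eq (grid : List (List String)) (row col n i : Int) (hn : 0 ≤ n) :
    altRowHit (PySem.List.pyGetD grid i []) row col n i =
      (PySem.List.pyRange 0 n 1).any (badB grid row col i) := by
  set r := PySem.List.pyGetD grid i [] with hr
  rw [Bool.eq_iff_iff]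
  simp only [altRowHit, badB, ← hr, List.any_eq_true, PySem.List.mem_pyRange_one,
    List.any_cons, List.any_nil, Bool.or_false, Bool.and_eq_true, Bool.or_eq_true,
    decide_eq_true_eq]
  by_cases hrow : i = row
  · simp only [if_pos hrow, decide_eq_true_eq, PySem.List.slice_to _ hn, mem_take_Q]
    constructor
    · rintro ⟨k, hk, hget⟩
      refine ⟨(k : Int), ⟨by omega, by omega⟩, ?_, Or.inl (Or.inl hrow)⟩
      rw [pyGetD_int r _ (by omega)]
      simpa using hget
    · rintro ⟨j, ⟨hj0, hjn⟩, hQ, _⟩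
      rw [pyGetD_int r j hj0] at hQ
      exact ⟨j.toNat, by omega, hQ⟩
  · simp only [if_neg hrow, List.any_cons, List.any_nil, Bool.or_false,
      Bool.and_eq_true, Bool.or_eq_true, decide_eq_true_eq]
    constructor
    · rintro (⟨⟨h0, h1⟩, hQ⟩ | ⟨⟨h0, h1⟩, hQ⟩ | ⟨⟨h0, h1⟩, hQ⟩)
      · exact ⟨col, ⟨h0, h1⟩, hQ, Or.inl (Or.inr rfl)⟩
      · exact ⟨col - (row - i), ⟨h0, h1⟩, hQ, Or.inr (by omega)⟩
      · exact ⟨col + (row - i), ⟨h0, h1⟩, hQ, Or.inr (by omega)⟩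
    · rintro ⟨j, ⟨hj0, hjn⟩, hQ, (h | h) | h⟩
      · exact absurd h hrow
      · exact Or.inl ⟨⟨by omega, by omega⟩, h ▸ hQ⟩
      · have h' : j = col - (row - i) ∨ j = col + (row - i) := by omega
        rcases h' with h' | h'
        · exact Or.inr (Or.inl ⟨⟨by omega, by omega⟩, h' ▸ hQ⟩)
        · exact Or.inr (Or.inr ⟨⟨by omega, by omega⟩, h' ▸ hQ⟩)

theorem loops_eq (grid : List (List String)) (row col n : Int) (hn : 0 ≤ n)
    (is : List Int) :
    isOkayA_I grid row col n is = isOkayB_I grid row col n is := by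
  induction is with
  | nil => rfl
  | cons i is ih =>
    simp only [isOkayA_I, isOkayB_I, isOkayA_J_eq, altRowHit_eq grid row col n i hn]
    by_cases h : (PySem.List.pyRange 0 n 1).any (badB grid row col i) = true
    · simp [h]
    · simp [h, ih]

-- ===== VERDICT (by name: the statement is the Claim_ definition above) =====
theorem isOkay_spec : Claim_equal_isOkay := by
  intro grid row col _ _
  show isOkay grid row col = isOkay_alt grid row col
  unfold isOkay isOkay_alt
  exact loops_eq grid row col _ (Int.natCast_nonneg _) _
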